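-- pv_equiv track=rewrite | github.com/sinhakrishnendu/babappasnake | babappasnake/scripts/strip_terminal_stop_codon.py | drop_all_gap_codon_columns
-- ===== SOURCE A (Python) =====
-- def drop_all_gap_codon_columns(seqs: list[str]) -> tuple[list[str], int]:
--     if not seqs:
--         return seqs, 0
--
--     aln_len = len(seqs[0])
--     if any(len(s) != aln_len for s in seqs):
--         raise RuntimeError("Input alignment sequences do not all have the same length")
--     if aln_len % 3 != 0:
--         raise RuntimeError(f"Aligned length {aln_len} is not divisible by 3")
--
--     kept_codon_starts = []
--     removed = 0
--     for i in range(0, aln_len, 3):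
--         if all(s[i : i + 3] == "---" for s in seqs):
--             removed += 1
--             continue
--         kept_codon_starts.append(i)
--
--     trimmed = ["".join(s[i : i + 3] for i in kept_codon_starts) for s in seqs]
--     return trimmed, removed
-- ===== SOURCE B (Python) =====
-- def drop_all_gap_codon_columns(seqs: list[str]) -> tuple[list[str], int]:
--     if not seqs:
--         return seqs, 0
--
--     aln_len = len(seqs[0])
--     if any(len(s) != aln_len for s in seqs):
--         raise RuntimeError("Input alignment sequences do not all have the same length")
--     if aln_len % 3 != 0:
--         raise RuntimeError(f"Aligned length {aln_len} is not divisible by 3")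
--
--     # chunk each sequence into codons, transpose to columns, filter out all-gap
--     # columns, transpose back; removed falls out as a length difference
--     rows = [["".join(t) for t in zip(*[iter(s)] * 3)] for s in seqs]
--     cols = list(zip(*rows))
--     kept = [col for col in cols if any(c != "---" for c in col)]
--     trimmed = ["".join(col[k] for col in kept) for k in range(len(seqs))]
--     return trimmed, len(cols) - len(kept)
-- ===== Notes on version B (the rewrite author's own statement) =====
-- stated objective: alternative
-- what changed: A scans codon starts with a running (kept-indices, removed) accumulator and then re-slices every sequence in a second pass; B has no index bookkeeping at all: it chunks each sequence into codons, transposes to columns, filters out the all-gap columns, transposes back by position, and obtains removed as a length difference.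
import Mathlib
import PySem

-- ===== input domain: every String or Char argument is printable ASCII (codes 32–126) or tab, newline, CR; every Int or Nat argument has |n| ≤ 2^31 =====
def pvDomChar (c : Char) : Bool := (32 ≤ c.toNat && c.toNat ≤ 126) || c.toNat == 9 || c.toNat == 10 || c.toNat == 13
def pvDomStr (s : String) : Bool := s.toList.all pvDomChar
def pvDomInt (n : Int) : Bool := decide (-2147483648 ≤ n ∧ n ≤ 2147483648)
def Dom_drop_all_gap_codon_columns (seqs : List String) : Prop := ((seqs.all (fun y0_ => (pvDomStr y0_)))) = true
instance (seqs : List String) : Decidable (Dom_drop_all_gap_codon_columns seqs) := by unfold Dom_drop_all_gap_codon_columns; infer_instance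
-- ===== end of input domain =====

-- B replaces A's indexed scan (running kept-starts/removed accumulator plus a second
-- re-slicing pass) by a chunk / transpose / filter / transpose-back pipeline, with
-- removed obtained as a length difference. Where the Python raises RuntimeError
-- (unequal lengths / length not divisible by 3) the ports return arbitrary sentinels;
-- those inputs are excluded by Pre_.

-- ===== PORT A =====
def drop_all_gap_codon_columns (seqs : List String) : List String × Int :=
  if seqs = [] then (seqs, 0)
  else
    let aln_len : Int := PySem.Str.len (seqs.headD "")
    if ¬ (seqs.all (fun s => PySem.Str.len s == aln_len)) then ([], 0)  -- Python: raise RuntimeError (unequal lengths); excluded by Pre_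
    else if PySem.Int.mod aln_len 3 ≠ 0 then ([], 0)  -- Python: raise RuntimeError (not divisible by 3); excluded by Pre_
    else
      let st := (PySem.List.pyRange 0 aln_len 3).foldl
        (fun (st : List Int × Int) i =>
          if seqs.all (fun s => PySem.List.slice s.toList (some i) (some (i + 3)) == ['-', '-', '-'])
          then (st.1, st.2 + 1)
          else (st.1 ++ [i], st.2)) ([], 0)
      let trimmed := seqs.map (fun s =>
        String.ofList (PySem.Chars.join []
          (st.1.map (fun i => PySem.List.slice s.toList (some i) (some (i + 3))))))
      (trimmed, st.2)

-- ===== PORT B =====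

-- zip(*[iter(s)] * 3): successive groups of 3 (a shorter remainder is dropped, as zip does)
def pvChunk3 {α : Type} : List α → List (List α)
  | a :: b :: c :: rest => [a, b, c] :: pvChunk3 rest
  | _ => []

-- zip(*rs): column after column, each one the heads of all lists, stopping at the shortest
def pvZipT {α : Type} (rs : List (List α)) : List (List α) :=
  if rs = [] ∨ rs.any List.isEmpty then []
  else rs.filterMap List.head? :: pvZipT (rs.map List.tail)
termination_by (rs.map List.length).sum
decreasing_by
  rename_i h
  rw [not_or] at h
  obtain ⟨hne, hall⟩ := h
  rw [Bool.not_eq_true, List.any_eq_false] at hall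
  obtain ⟨r, rest, rfl⟩ := List.exists_cons_of_ne_nil hne
  have hr := hall r (by simp)
  have hlt : r.tail.length < r.length := by
    cases r with
    | nil => simp at hr
    | cons x xs => simp
  have hle : (rest.map (fun l => l.tail.length)).sum ≤ (rest.map List.length).sum :=
    List.sum_le_sum (fun l _ => by cases l <;> simp)
  simp only [List.map_cons, List.map_map, List.sum_cons, Function.comp_def]
  omega

def drop_all_gap_codon_columns_alt (seqs : List String) : List String × Int :=
  if seqs = [] then (seqs, 0)
  else
    let aln_len : Int := PySem.Str.len (seqs.headD "")
    if ¬ (seqs.all (fun s => PySem.Str.len s == aln_len)) then ([], -1)  -- Python: raise RuntimeError (unequal lengths); excluded by Pre_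
    else if PySem.Int.mod aln_len 3 ≠ 0 then ([], -1)  -- Python: raise RuntimeError (not divisible by 3); excluded by Pre_
    else
      let rows := seqs.map (fun s => pvChunk3 s.toList)
      let cols := pvZipT rows
      let kept := cols.filter (fun col => col.any (fun c => !(c == ['-', '-', '-'])))
      -- col[k] never raises here (every kept column has one codon per sequence): the getD default is inert
      let trimmed := (PySem.List.pyRange 0 (seqs.length : Int) 1).map
        (fun k => String.ofList (PySem.Chars.join []
          (kept.map (fun col => (PySem.List.pyGet? col k).getD []))))
      (trimmed, (cols.length : Int) - (kept.length : Int))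

-- ===== PRECONDITION & SPEC =====
-- Pre_ excludes exactly the inputs on which A raises RuntimeError: some sequence's length
-- differs from the first one's, or the common length is not divisible by 3.
def Pre_drop_all_gap_codon_columns (seqs : List String) : Prop :=
  seqs = [] ∨
    (seqs.all (fun s => PySem.Str.len s == PySem.Str.len (seqs.headD "")) = true ∧
     PySem.Int.mod (PySem.Str.len (seqs.headD "")) 3 = 0)
instance (seqs : List String) : Decidable (Pre_drop_all_gap_codon_columns seqs) := by
  unfold Pre_drop_all_gap_codon_columns; infer_instance

def pvWitness_drop_all_gap_codon_columns : List String := ["---ATG", "AAAATG"]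

def Spec_drop_all_gap_codon_columns (seqs : List String) (out : List String × Int) : Prop :=
  out = drop_all_gap_codon_columns_alt seqs
instance (seqs : List String) (out : List String × Int) : Decidable (Spec_drop_all_gap_codon_columns seqs out) := by
  unfold Spec_drop_all_gap_codon_columns; infer_instance

-- ===== CLAIM =====
def Claim_equal_drop_all_gap_codon_columns : Prop :=
  ∀ (seqs : List String), Dom_drop_all_gap_codon_columns seqs →
    Pre_drop_all_gap_codon_columns seqs →
    Spec_drop_all_gap_codon_columns seqs (drop_all_gap_codon_columns seqs)

-- ===== LEMMAS AND PROOFS =====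

-- A's loop is a filter (kept starts) plus a count (removed)
theorem pv_foldA (p : Int → Bool) (l : List Int) (k0 : List Int) (r0 : Int) :
    l.foldl (fun (st : List Int × Int) i => if p i then (st.1, st.2 + 1) else (st.1 ++ [i], st.2)) (k0, r0)
      = (k0 ++ l.filter (fun i => !(p i)), r0 + ((l.filter p).length : Int)) := by
  induction l generalizing k0 r0 with
  | nil => simp
  | cons i l ih =>
    simp only [List.foldl_cons]
    by_cases h : p i = true
    · simp [h, ih]; ring
    · simp only [Bool.not_eq_true] at h
      simp [h, ih]

-- chunking a list of length 3*m yields its m width-3 windows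
theorem pv_chunk3_eq (m : Nat) : ∀ (l : List Char), l.length = 3 * m →
    pvChunk3 l = (List.range m).map (fun k => List.take 3 (List.drop (3 * k) l)) := by
  induction m with
  | zero =>
    intro l hl
    rw [show l = [] from List.length_eq_zero_iff.mp (by omega)]
    rfl
  | succ m ih =>
    intro l hl
    match l, hl with
    | a :: b :: c :: rest, hl =>
      have hrest : rest.length = 3 * m := by simp only [List.length_cons] at hl; omega
      rw [List.range_succ_eq_map]
      simp only [pvChunk3, List.map_cons, List.map_map, List.drop_zero, Nat.mul_zero]
      rw [ih rest hrest]
      refine congrArg₂ _ rfl ?_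
      apply List.map_congr_left
      intro k _
      simp only [Function.comp_def]
      congr 1

-- transposing a rectangular list of rows (each row the same comprehension over range m)
theorem pv_zipT_eq {α β : Type} (m : Nat) : ∀ (xs : List α) (g : α → Nat → β), xs ≠ [] →
    pvZipT (xs.map (fun x => (List.range m).map (g x)))
      = (List.range m).map (fun k => xs.map (fun x => g x k)) := by
  induction m with
  | zero =>
    intro xs g hx
    obtain ⟨x, t, rfl⟩ := List.exists_cons_of_ne_nil hx
    rw [pvZipT]
    simp
  | succ m ih =>
    intro xs g hx
    have hrw : xs.map (fun x => (List.range (m + 1)).map (g x))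
        = xs.map (fun x => g x 0 :: (List.range m).map (fun k => g x (k + 1))) := by
      apply List.map_congr_left
      intro x _
      rw [List.range_succ_eq_map]
      simp [List.map_map]
    rw [hrw, pvZipT, if_neg ?hc]
    case hc =>
      rw [not_or]
      refine ⟨by simpa using hx, ?_⟩
      rw [Bool.not_eq_true, List.any_eq_false]
      intro l hl
      simp only [List.mem_map] at hl
      obtain ⟨x, _, rfl⟩ := hl
      simp
    have h1 : (xs.map (fun x => g x 0 :: (List.range m).map (fun k => g x (k + 1)))).filterMap List.head?
        = xs.map (fun x => g x 0) := by
      rw [List.filterMap_map]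
      simp
    have h2 : (xs.map (fun x => g x 0 :: (List.range m).map (fun k => g x (k + 1)))).map List.tail
        = xs.map (fun x => (List.range m).map (fun k => g x (k + 1))) := by
      rw [List.map_map]
      rfl
    rw [h1, h2, ih xs (fun x k => g x (k + 1)) hx, List.range_succ_eq_map]
    simp [List.map_map, Function.comp_def]

-- ===== VERDICT =====
theorem drop_all_gap_codon_columns_spec : Claim_equal_drop_all_gap_codon_columns := by
  intro seqs _ hpre
  unfold Spec_drop_all_gap_codon_columns drop_all_gap_codon_columns drop_all_gap_codon_columns_alt
  by_cases hnil : seqs = []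
  · simp [hnil]
  rcases hpre with h | ⟨hlen, hmod⟩
  · exact absurd h hnil
  simp only [if_neg hnil, hlen, hmod, not_true_eq_false, if_false, ne_eq]
  set L := PySem.Str.len (seqs.headD "") with hLdef
  have hL0 : 0 ≤ L := by rw [hLdef, PySem.Str.len_eq]; positivity
  obtain ⟨c, hc⟩ := (PySem.Int.mod_eq_zero_iff_dvd L 3).mp hmod
  set m := c.toNat with hmdef
  have hcm : L = 3 * (m : Int) := by omega
  have hslice : ∀ (cs : List Char) (k : Nat),
      PySem.List.slice cs (some (3 * (k : Int))) (some (3 * (k : Int) + 3))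
        = List.take 3 (List.drop (3 * k) cs) := by
    intro cs k
    have h3 : (3 : Int) * (k : Int) = ((3 * k : Nat) : Int) := by push_cast; ring
    rw [h3, show ((3 * k : Nat) : Int) + 3 = ((3 * k : Nat) : Int) + ((3 : Nat) : Int) from by norm_num,
       PySem.List.slice_natCast_add]
  have hstarts : PySem.List.pyRange 0 L 3 = (List.range m).map (fun (k : Nat) => (3 : Int) * (k : Int)) := by
    rw [PySem.List.pyRange_of_pos 0 L (by norm_num)]
    have hcount : (if (0 : Int) < L then ((L - 0 + 3 - 1) / 3).toNat else 0) = m := by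
      split <;> omega
    rw [hcount]
    apply List.map_congr_left
    intro k _
    ring
  have hlens : ∀ s ∈ seqs, s.toList.length = 3 * m := by
    intro s hs
    have h1 := List.all_eq_true.mp hlen s hs
    rw [beq_iff_eq, PySem.Str.len_eq] at h1
    omega
  have hrows : seqs.map (fun s => pvChunk3 s.toList)
      = seqs.map (fun s => (List.range m).map (fun k => List.take 3 (List.drop (3 * k) s.toList))) :=
    List.map_congr_left (fun s hs => pv_chunk3_eq m s.toList (hlens s hs))
  have hcols : pvZipT (seqs.map (fun s => (List.range m).map (fun k => List.take 3 (List.drop (3 * k) s.toList))))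
      = (List.range m).map (fun k => seqs.map (fun s => List.take 3 (List.drop (3 * k) s.toList))) :=
    pv_zipT_eq m seqs (fun s k => List.take 3 (List.drop (3 * k) s.toList)) hnil
  rw [hrows, hcols, hstarts, pv_foldA]
  -- both filters test the same per-column condition
  have hcond : ((fun (col : List (List Char)) => col.any fun c => !(c == ['-', '-', '-'])) ∘
        (fun k => seqs.map (fun s => List.take 3 (List.drop (3 * k) s.toList))))
      = ((fun i => !(seqs.all fun s =>
            PySem.List.slice s.toList (some i) (some (i + 3)) == ['-', '-', '-'])) ∘
        (fun (k : Nat) => (3 : Int) * (k : Int))) := by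
    funext k
    simp only [Function.comp_def, List.any_map, Function.comp_def, hslice]
    rw [List.not_all_eq_any_not]
  rw [List.filter_map, List.filter_map, List.filter_map, hcond]
  simp only [Prod.mk.injEq]
  constructor
  · -- trimmed
    rw [PySem.List.pyRange_one,
       show (((seqs.length : Int)) - 0).toNat = seqs.length from by simp]
    apply List.ext_getElem
    · simp
    intro t h1 h2
    simp only [List.length_map] at h1
    have ht : t < seqs.length := by simpa using h1
    simp only [List.getElem_map, List.getElem_range, List.map_map, List.nil_append, zero_add]
    congr 1
    congr 1
    apply List.map_congr_left
    intro k _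
    simp only [Function.comp_def, hslice, PySem.List.pyGet?_natCast, List.getElem?_map,
      List.getElem?_eq_getElem ht, Option.map_some, Option.getD_some]
  · -- removed
    have hsplit := List.length_eq_length_filter_add
      (f := (fun i => (seqs.all fun s =>
          PySem.List.slice s.toList (some i) (some (i + 3)) == ['-', '-', '-'])) ∘
        (fun (k : Nat) => (3 : Int) * (k : Int))) (l := List.range m)
    rw [show ((fun i => !(seqs.all fun s =>
          PySem.List.slice s.toList (some i) (some (i + 3)) == ['-', '-', '-'])) ∘
        (fun (k : Nat) => (3 : Int) * (k : Int)))
      = (fun x => !(((fun i => (seqs.all fun s =>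
          PySem.List.slice s.toList (some i) (some (i + 3)) == ['-', '-', '-'])) ∘
        (fun (k : Nat) => (3 : Int) * (k : Int))) x)) from rfl]
    simp only [List.length_map, List.length_range] at hsplit ⊢
    omega
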